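-- pv_equiv track=rewrite | github.com/ftarazona/dayatstockly | main.py | check_empty_suffixes
-- ===== SOURCE A (Python) =====
-- def check_empty_suffixes(words):
--     """Check that any empty word is at the beginning of the list"""
--     encountered_non_empty = False
--     for word in words:
--         if encountered_non_empty and len(word) <= 1:
--             return False
--         if len(word) > 1:
--             encountered_non_empty = True
--     return True
-- ===== SOURCE B (Python) =====
-- def check_empty_suffixes(words):
--     """Check that any empty word is at the beginning of the list"""
--     k = sum(1 for w in words if len(w) <= 1)
--     return all(len(w) <= 1 for w in words[:k])
-- ===== Notes on version B (the rewrite author's own statement) =====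
-- stated objective: alternative
-- what changed: B uses a counting argument instead of a stateful scan: it counts the short words (len <= 1) and checks that they all sit in the prefix of that length, which holds iff shorts precede longs.
import Mathlib
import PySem

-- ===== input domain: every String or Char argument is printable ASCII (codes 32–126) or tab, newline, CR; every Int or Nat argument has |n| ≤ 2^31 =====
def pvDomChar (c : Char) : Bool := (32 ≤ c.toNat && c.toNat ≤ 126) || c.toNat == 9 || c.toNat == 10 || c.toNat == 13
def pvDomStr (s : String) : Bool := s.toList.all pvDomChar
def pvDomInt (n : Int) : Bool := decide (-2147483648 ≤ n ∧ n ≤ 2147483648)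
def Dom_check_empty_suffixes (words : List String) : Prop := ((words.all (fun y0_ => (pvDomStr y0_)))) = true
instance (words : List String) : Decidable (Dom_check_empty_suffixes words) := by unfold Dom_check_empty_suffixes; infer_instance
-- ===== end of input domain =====

-- B replaces A's stateful one-pass flag scan by a counting argument: count the short
-- words (len <= 1) and check they all occupy the prefix of that length (objective: alternative).

-- ===== PORT A =====
-- A's for-loop with the 'encountered_non_empty' flag, as structural recursion over the list.
def checkLoopA : List String → Bool → Bool
  | [], _ => true
  | w :: ws, flag =>
      if flag ∧ PySem.Str.len w ≤ 1 then false
      else checkLoopA ws (if PySem.Str.len w > 1 then true else flag)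

def check_empty_suffixes (words : List String) : Bool := checkLoopA words false

-- ===== PORT B =====
-- k = sum(1 for w in words if len(w) <= 1)
def shortCount (words : List String) : Int :=
  words.foldl (fun acc w => if PySem.Str.len w ≤ 1 then acc + 1 else acc) 0

-- all(len(w) <= 1 for w in words[:k])
def check_empty_suffixes_alt (words : List String) : Bool :=
  (PySem.List.slice words none (some (shortCount words))).all
    (fun w => PySem.Str.len w ≤ 1)

-- ===== PRECONDITION & SPEC =====
def Spec_check_empty_suffixes (words : List String) (out : Bool) : Prop := out = check_empty_suffixes_alt words
instance (words : List String) (out : Bool) : Decidable (Spec_check_empty_suffixes words out) := by unfold Spec_check_empty_suffixes; infer_instance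

-- ===== CLAIM (what is proved, stated in full; the proofs are below) =====
def Claim_equal_check_empty_suffixes : Prop := ∀ (words : List String), Dom_check_empty_suffixes words → Spec_check_empty_suffixes words (check_empty_suffixes words)

-- ===== LEMMAS AND PROOFS =====

-- The counting fold is countP of "short", cast to Int.
theorem shortCount_eq (ws : List String) (acc : Int) :
    ws.foldl (fun acc w => if PySem.Str.len w ≤ 1 then acc + 1 else acc) acc
      = acc + ((ws.countP (fun w => w.length ≤ 1) : Nat) : Int) := by
  induction ws generalizing acc with
  | nil => simp
  | cons w ws ih =>
      simp only [List.foldl_cons, List.countP_cons]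
      by_cases h : w.length ≤ 1
      · rw [if_pos (by simp only [PySem.Str.len_eq]; exact_mod_cast h), ih]
        simp [h]; ring
      · rw [if_neg (by simp only [PySem.Str.len_eq]; exact_mod_cast h), ih]
        simp [h]

-- Once the flag is set, A's loop checks that every remaining word is long.
theorem checkLoopA_true (ws : List String) :
    checkLoopA ws true = ws.all (fun x => 1 < PySem.Str.len x) := by
  induction ws with
  | nil => rfl
  | cons w ws ih =>
      unfold checkLoopA
      by_cases h1 : PySem.Str.len w ≤ 1
      · rw [if_pos ⟨rfl, h1⟩, List.all_cons,
          show decide (1 < PySem.Str.len w) = false by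
            simp only [decide_eq_false_iff_not]; omega]
        rfl
      · rw [if_neg (fun hc => h1 hc.2),
          show (if PySem.Str.len w > 1 then true else true) = true from by split <;> rfl,
          ih, List.all_cons,
          show decide (1 < PySem.Str.len w) = true by
            simp only [decide_eq_true_eq]; omega]
        rw [Bool.true_and]

-- Core equivalence: A's flag loop equals "the first (count of shorts) words are all short".
theorem loopA_eq_take (ws : List String) :
    checkLoopA ws false
      = (ws.take (ws.countP (fun w => w.length ≤ 1))).all (fun w => w.length ≤ 1) := by
  induction ws with
  | nil => rfl
  | cons w ws ih =>
      by_cases h : w.length ≤ 1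
      · have hlen : (w.length : Int) ≤ 1 := by exact_mod_cast h
        simp [checkLoopA, PySem.Str.len_eq, hlen, show ¬ (1 : Int) < (w.length : Int) by omega,
          h, List.take_succ_cons, ih]
      · have hlen : ¬ ((w.length : Int) ≤ 1) := by exact_mod_cast h
        rw [show checkLoopA (w :: ws) false = checkLoopA ws true by
          simp [checkLoopA, PySem.Str.len_eq, hlen, show (1 : Int) < (w.length : Int) by omega]]
        rw [checkLoopA_true]
        have hcount : List.countP (fun w => decide (w.length ≤ 1)) (w :: ws)
            = List.countP (fun w => decide (w.length ≤ 1)) ws := by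
          simp [h]
        rcases Nat.eq_zero_or_pos (ws.countP (fun w => w.length ≤ 1)) with hc | hc
        · rw [hcount, hc]
          simp only [List.take_zero, List.all_nil]
          rw [List.all_eq_true]
          intro x hx
          have := (List.countP_eq_zero.mp hc) x hx
          simp only [PySem.Str.len_eq, decide_eq_true_eq, String.length_toList] at this ⊢
          omega
        · have hall : ws.all (fun x => 1 < PySem.Str.len x) = false := by
            rw [List.all_eq_false]
            obtain ⟨x, hx, hxp⟩ := List.countP_pos_iff.mp hc
            refine ⟨x, hx, ?_⟩
            simp only [PySem.Str.len_eq, decide_eq_true_eq, String.length_toList] at hxp ⊢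
            omega
          obtain ⟨c, hcc⟩ : ∃ c, ws.countP (fun w => w.length ≤ 1) = c + 1 :=
            ⟨_, (Nat.succ_pred_eq_of_pos hc).symm⟩
          rw [hall, hcount, hcc, List.take_succ_cons]
          simp [h]

-- ===== VERDICT (by name: the statement is the Claim_ definition above) =====
theorem check_empty_suffixes_spec : Claim_equal_check_empty_suffixes := by
  intro words _
  unfold Spec_check_empty_suffixes check_empty_suffixes check_empty_suffixes_alt shortCount
  rw [shortCount_eq, loopA_eq_take]
  rw [show (0 : Int) + ((words.countP (fun w => w.length ≤ 1) : Nat) : Int)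
      = ((words.countP (fun w => w.length ≤ 1) : Nat) : Int) by ring]
  rw [PySem.List.slice_to_natCast]
  congr 1
  funext w
  simp only [PySem.Str.len_eq, decide_eq_decide, String.length_toList]
  omega
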